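-- pv_equiv track=rewrite | github.com/Gaju27/Assignment_17_B | count_product_single_distinct_prime_factor.py | cntsingleFactorPair
-- ===== SOURCE A (Python) =====
-- def singlePrimeFactor(N):
--     # Stores distinct
--     # prime factors of N
--     disPrimeFact = {}
--
--     # Calculate prime factor of N
--     for i in range(2, N + 1):
--         if i * i > N:
--             break
--
--         # Calculate distinct
--         # prime factor
--         while (N % i == 0):
--             # Insert i into
--             # disPrimeFact
--             disPrimeFact[i] = 1
--
--             # Update N
--             N //= i
--
--     # If N is not equal to 1
--     if (N != 1):
--         # Insert N into
--         # disPrimeFact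
--         disPrimeFact[N] = 1
--
--     # If N contains a single
--     # distinct prime factor
--     if (len(disPrimeFact) == 1):
--         # Return single distinct
--         # prime factor of N
--         return list(disPrimeFact.keys())[0]
--
--     # If N contains more than one
--     # distinct prime factor
--     return -1
--
-- def cntsingleFactorPair(arr, N):
--     # Stores count of 1s
--     # in the array
--     countOf1 = 0
--
--     # mp[i]: Stores count of array elements
--     # whose distinct prime factor is only i
--     mp = {}
--
--     # Traverse the array arr[]
--     for i in range(N):
--
--         # If current element is 1
--         if (arr[i] == 1):
--             countOf1 += 1
--             continue
--
--         # Store distinct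
--         # prime factor of arr[i]
--         factorValue = singlePrimeFactor(arr[i])
--
--         # If arr[i] contains more
--         # than one prime factor
--         if (factorValue == -1):
--             continue
--
--         # If arr[i] contains
--         # a single prime factor
--         else:
--             mp[factorValue] = mp.get(factorValue, 0) + 1
--
--     # Stores the count of pairs whose
--     # product of elements contains only
--     # a single distinct prime factor
--     res = 0
--
--     # Traverse the map mp[]
--     for it in mp:
--         # Stores count of array elements
--         # whose prime factor is (it.first)
--         X = mp[it]
--
--         # Update res
--         res += countOf1 * X + (X * (X - 1)) // 2
--
--     return res
-- ===== SOURCE B (Python) =====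
-- def primeRoot(v):
--     # smallest trial factor; then decide "power of that factor" by growing
--     # powers upward and comparing, instead of dividing v down / collecting factors
--     i = 2
--     while i * i <= v:
--         if v % i == 0:
--             pw = i
--             while pw < v:
--                 pw *= i
--             return i if pw == v else -1
--         i += 1
--     return v if v != 1 else -1
--
-- def cntsingleFactorPair(arr, N):
--     # single online pass: each element adds the number of previously seen
--     # compatible partners; no closed-form ones*X + X*(X-1)//2 at the end
--     res = ones = pp = 0
--     seen = {}
--     for idx in range(N):
--         v = arr[idx]
--         if v == 1:
--             res += pp
--             ones += 1
--         else:
--             p = primeRoot(v)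
--             if p != -1:
--                 res += ones + seen.get(p, 0)
--                 seen[p] = seen.get(p, 0) + 1
--                 pp += 1
--     return res
-- ===== Notes on version B (the rewrite author's own statement) =====
-- stated objective: alternative
-- what changed: The helper decides 'single distinct prime factor' by growing powers of the smallest trial factor upward and comparing against v (no dict of factors, no divide-out loop feeding a dict), and the pair count becomes one online pass in which each element adds the number of previously seen compatible partners, replacing A's group-then-closed-form countOf1*X + X*(X-1)//2 stage.
import Mathlib
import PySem

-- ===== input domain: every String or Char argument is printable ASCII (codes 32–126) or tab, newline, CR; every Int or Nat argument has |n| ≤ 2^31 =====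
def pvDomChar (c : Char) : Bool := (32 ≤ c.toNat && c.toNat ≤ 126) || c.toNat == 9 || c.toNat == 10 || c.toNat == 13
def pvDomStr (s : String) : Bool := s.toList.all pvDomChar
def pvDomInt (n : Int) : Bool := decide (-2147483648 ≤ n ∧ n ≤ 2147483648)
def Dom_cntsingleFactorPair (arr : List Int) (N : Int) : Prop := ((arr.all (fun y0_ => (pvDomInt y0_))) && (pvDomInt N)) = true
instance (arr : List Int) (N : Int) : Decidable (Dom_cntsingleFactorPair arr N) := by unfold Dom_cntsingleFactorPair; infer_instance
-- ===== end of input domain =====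

-- B decides 'single distinct prime factor' by growing powers of the smallest trial factor and
-- comparing, and counts pairs in one online pass over previously-seen elements instead of
-- grouping and applying the closed form (objective: alternative).


-- ===== PORT A =====

-- inner `while N % i == 0: disPrimeFact[i] = 1; N //= i` (fuel-bounded; fuel N.toNat is sufficient)
def innerA (i : Int) : Int → PySem.Dict Int Int → Nat → Int × PySem.Dict Int Int
  | N, d, 0 => (N, d)
  | N, d, fuel + 1 =>
    if PySem.Int.mod N i = 0 then innerA i (PySem.Int.floordiv N i) (d.insert i 1) fuel
    else (N, d)

-- `for i in range(2, N+1): if i*i > N: break; <inner while>` — fuel = number of range elements,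
-- so fuel running out is exactly the range running out
def outerA : Int → Int → PySem.Dict Int Int → Nat → Int × PySem.Dict Int Int
  | _, N, d, 0 => (N, d)
  | i, N, d, fuel + 1 =>
    if N < i * i then (N, d)
    else
      let p := innerA i N d N.toNat
      outerA (i + 1) p.1 p.2 fuel

-- the tail of singlePrimeFactor after the loop: optional insert of the remainder, then the
-- length-1 test; `list(disPrimeFact.keys())[0]` is taken only when the dict has exactly one key
def finishA (p : Int × PySem.Dict Int Int) : Int :=
  let d := if p.1 ≠ 1 then p.2.insert p.1 1 else p.2
  if d.size = 1 then d.keys.headD 0 else -1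

def singlePrimeFactorA (N : Int) : Int :=
  finishA (outerA 2 N PySem.Dict.empty (N - 1).toNat)

-- the body of A's first loop, on the value arr[i] (mp[factorValue] = mp.get(factorValue, 0) + 1)
def stepA (st : Int × PySem.Dict Int Int) (v : Int) : Int × PySem.Dict Int Int :=
  if v = 1 then (st.1 + 1, st.2)
  else if singlePrimeFactorA v = -1 then st
  else (st.1, st.2.insert (singlePrimeFactorA v) (st.2.getD (singlePrimeFactorA v) 0 + 1))

def cntsingleFactorPair (arr : List Int) (N : Int) : Int :=
  let st := (PySem.List.pyRange 0 N 1).foldl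
    (fun st i => stepA st (PySem.List.pyGetD arr i 0))   -- arr[i]; in range under Pre_
    ((0 : Int), (PySem.Dict.empty : PySem.Dict Int Int))
  -- `for it in mp: X = mp[it]; res += countOf1 * X + (X*(X-1))//2` (the key is present, so mp[it] = getD)
  st.2.keys.foldl (fun r k =>
      r + (st.1 * st.2.getD k 0
            + PySem.Int.floordiv (st.2.getD k 0 * (st.2.getD k 0 - 1)) 2)) 0

-- ===== PORT B =====

-- `pw = i; while pw < v: pw *= i` (fuel-bounded; fuel v.toNat is sufficient)
def powUpB (i : Int) : Int → Int → Nat → Int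
  | pw, _, 0 => pw
  | pw, v, fuel + 1 => if pw < v then powUpB i (pw * i) v fuel else pw

-- `while i*i <= v: if v % i == 0: <grow powers>; return i if pw==v else -1; i += 1` /
-- after the loop `return v if v != 1 else -1` (fuel v.toNat+1 is sufficient)
def prLoopB : Int → Int → Nat → Int
  | _, v, 0 => if v ≠ 1 then v else -1
  | i, v, fuel + 1 =>
    if v < i * i then (if v ≠ 1 then v else -1)
    else if PySem.Int.mod v i = 0 then
      (if powUpB i i v v.toNat = v then i else -1)
    else prLoopB (i + 1) v fuel

def primeRootB (v : Int) : Int := prLoopB 2 v (v.toNat + 1)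

-- one loop body of B's online pass; state = (res, ones, pp, seen)
def stepB (st : Int × Int × Int × PySem.Dict Int Int) (v : Int) :
    Int × Int × Int × PySem.Dict Int Int :=
  if v = 1 then (st.1 + st.2.2.1, st.2.1 + 1, st.2.2.1, st.2.2.2)
  else if primeRootB v = -1 then st
  else (st.1 + st.2.1 + st.2.2.2.getD (primeRootB v) 0, st.2.1, st.2.2.1 + 1,
        st.2.2.2.insert (primeRootB v) (st.2.2.2.getD (primeRootB v) 0 + 1))

def cntsingleFactorPair_alt (arr : List Int) (N : Int) : Int :=
  ((PySem.List.pyRange 0 N 1).foldl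
    (fun st i => stepB st (PySem.List.pyGetD arr i 0))   -- arr[idx]; in range under Pre_
    ((0 : Int), (0 : Int), (0 : Int), (PySem.Dict.empty : PySem.Dict Int Int))).1

-- ===== PRECONDITION & SPEC =====
-- A raises IndexError on arr[i] when N > len(arr) (and so does B); Pre_ excludes exactly those inputs.
def Pre_cntsingleFactorPair (arr : List Int) (N : Int) : Prop := N ≤ (arr.length : Int)
instance (arr : List Int) (N : Int) : Decidable (Pre_cntsingleFactorPair arr N) := by unfold Pre_cntsingleFactorPair; infer_instance
def pvWitness_cntsingleFactorPair : List Int × Int := ([6, 2, 1, 8], 4)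

def Spec_cntsingleFactorPair (arr : List Int) (N : Int) (out : Int) : Prop := out = cntsingleFactorPair_alt arr N
instance (arr : List Int) (N : Int) (out : Int) : Decidable (Spec_cntsingleFactorPair arr N out) := by unfold Spec_cntsingleFactorPair; infer_instance

-- ===== CLAIM (what is proved, stated in full; the proofs are below) =====
def Claim_equal_cntsingleFactorPair : Prop := ∀ (arr : List Int) (N : Int), Dom_cntsingleFactorPair arr N → Pre_cntsingleFactorPair arr N → Spec_cntsingleFactorPair arr N (cntsingleFactorPair arr N)

-- ===== LEMMAS AND PROOFS =====

-- proof-only helper: A's inner while as pure divide-out (no dict), to factor innerA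
def divOutP (i : Int) : Int → Nat → Int
  | v, 0 => v
  | v, fuel + 1 =>
    if PySem.Int.mod v i = 0 then divOutP i (PySem.Int.floordiv v i) fuel else v

lemma innerA_eq (i : Int) : ∀ (fuel : Nat) (N : Int) (d : PySem.Dict Int Int),
    innerA i N d fuel
      = (divOutP i N fuel, if 0 < fuel ∧ PySem.Int.mod N i = 0 then d.insert i 1 else d) := by
  intro fuel
  induction fuel with
  | zero => intro N d; simp [innerA, divOutP]
  | succ f ih =>
    intro N d
    by_cases h : PySem.Int.mod N i = 0
    · simp only [innerA, divOutP, h, if_pos]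
      rw [ih]
      by_cases h2 : 0 < f ∧ PySem.Int.mod (PySem.Int.floordiv N i) i = 0
      · simp [h2, PySem.Dict.insert_insert_self]
      · simp [h2]
    · simp [innerA, divOutP, h]

-- with fuel ≥ N the divide-out loop really finishes: result positive, not divisible by i
lemma divOutP_spec (i : Int) (hi : 2 ≤ i) : ∀ (fuel : Nat) (N : Int), 1 ≤ N → N.toNat ≤ fuel →
    1 ≤ divOutP i N fuel ∧ PySem.Int.mod (divOutP i N fuel) i ≠ 0 ∧ divOutP i N fuel ≤ N := by
  intro fuel
  induction fuel with
  | zero => intro N h1 h2; omega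
  | succ f ih =>
    intro N h1 h2
    by_cases h : PySem.Int.mod N i = 0
    · have hdvd : i ∣ N := (PySem.Int.mod_eq_zero_iff_dvd N i).1 h
      have hle : i ≤ N := Int.le_of_dvd (by omega) hdvd
      have hfd : PySem.Int.floordiv N i = N / i := PySem.Int.floordiv_eq_ediv_of_pos (by omega)
      have h1' : 1 ≤ N / i := by rw [Int.le_ediv_iff_mul_le (by omega)]; omega
      have hlt : N / i < N := by
        rw [Int.ediv_lt_iff_lt_mul (by omega)]; nlinarith
      have := ih (PySem.Int.floordiv N i) (by omega) (by omega)
      simp only [divOutP, h, if_pos]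
      exact ⟨this.1, this.2.1, by omega⟩
    · simp [divOutP, h, h1]

-- once N has been reduced to 1, A's remaining loop does nothing
lemma outerA_one (i : Int) (hi : 2 ≤ i) (d : PySem.Dict Int Int) (fuel : Nat) :
    outerA i 1 d fuel = (1, d) := by
  cases fuel with
  | zero => rfl
  | succ f =>
    have : (1 : Int) < i * i := by nlinarith
    simp [outerA, this]

-- A's loop keeps every key, and either leaves (N, d) alone or has inserted some key ≥ i
lemma outerA_grow : ∀ (fuel : Nat) (i M : Int) (d : PySem.Dict Int Int), 2 ≤ i → 1 ≤ M →
    1 ≤ (outerA i M d fuel).1 ∧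
    (∀ k ∈ d.keys, k ∈ (outerA i M d fuel).2.keys) ∧
    (((outerA i M d fuel).1 = M ∧ (outerA i M d fuel).2 = d) ∨
      (∃ t ∈ (outerA i M d fuel).2.keys, i ≤ t)) := by
  intro fuel
  induction fuel with
  | zero => intro i M d hi hM; simp [outerA, hM]
  | succ f ih =>
    intro i M d hi hM
    by_cases hb : M < i * i
    · simp [outerA, hb, hM]
    · simp only [outerA, hb, if_false]
      rw [innerA_eq]
      have hM4 : 4 ≤ M := by nlinarith
      have hfuel : (0:Nat) < M.toNat := by omega
      by_cases h : PySem.Int.mod M i = 0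
      · have hr := divOutP_spec i hi M.toNat M (by omega) (le_refl _)
        simp only [hfuel, h, and_true, if_pos]
        obtain ⟨h1, h2, h3⟩ := ih (i+1) (divOutP i M M.toNat) (d.insert i 1) (by omega) hr.1
        refine ⟨h1, ?_, ?_⟩
        · intro k hk
          exact h2 k ((PySem.Dict.mem_keys_insert _ _ _ _).2 (Or.inr hk))
        · right
          exact ⟨i, h2 i ((PySem.Dict.mem_keys_insert _ _ _ _).2 (Or.inl rfl)), le_refl i⟩
      · simp only [hfuel, h, and_false, if_false]
        have hMM : divOutP i M M.toNat = M := by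
          cases hN : M.toNat with
          | zero => omega
          | succ g => simp [divOutP, h]
        rw [hMM]
        obtain ⟨h1, h2, h3⟩ := ih (i+1) M d (by omega) hM
        refine ⟨h1, h2, ?_⟩
        rcases h3 with ⟨ha, hb2⟩ | ⟨t, ht, hti⟩
        · exact Or.inl ⟨ha, hb2⟩
        · exact Or.inr ⟨t, ht, by omega⟩

lemma two_mem_length {l : List Int} {a b : Int} (ha : a ∈ l) (hb : b ∈ l) (hne : a ≠ b) :
    2 ≤ l.length := by
  match l with
  | [] => simp at ha
  | [x] => simp at ha hb; omega
  | x :: y :: rest => simp [List.length]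

lemma sing_keys (v : Int) : (PySem.Dict.empty.insert v (1:Int)).keys = [v] := by
  simp [PySem.Dict.keys_insert_of_not_contains, PySem.Dict.contains_empty, PySem.Dict.keys_empty]

lemma sing_size (v : Int) : (PySem.Dict.empty.insert v (1:Int)).size = 1 := by
  simp [PySem.Dict.size_insert, PySem.Dict.contains_empty, PySem.Dict.size_empty]

lemma size_eq_keys_length (d : PySem.Dict Int Int) : d.size = d.keys.length := by
  simp [PySem.Dict.size, PySem.Dict.keys]

lemma sing2_size (i r : Int) (h : r ≠ i) : ((PySem.Dict.empty.insert i (1:Int)).insert r 1).size = 2 := by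
  have hc : ((PySem.Dict.empty.insert i (1:Int)).contains r) = false := by
    simp [PySem.Dict.contains_insert, PySem.Dict.contains_empty, h]
  simp [PySem.Dict.size_insert, hc]

lemma mod_self_zero (i : Int) : PySem.Int.mod i i = 0 := (PySem.Int.mod_eq_zero_iff_dvd i i).2 dvd_rfl

-- ----- B's power-growing check vs divide-out -----

lemma powUp_imp_pow (i : Int) : ∀ (fuel : Nat) (pw v : Int) (m : Nat), pw = i ^ m →
    powUpB i pw v fuel = v → ∃ k, v = i ^ k := by
  intro fuel
  induction fuel with
  | zero =>
    intro pw v m hm h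
    simp only [powUpB] at h
    exact ⟨m, by rw [← h, hm]⟩
  | succ f ih =>
    intro pw v m hm h
    by_cases hlt : pw < v
    · simp only [powUpB, hlt, if_pos] at h
      exact ih (pw * i) v (m + 1) (by rw [hm, pow_succ]) h
    · simp only [powUpB, hlt, if_neg, not_false_iff] at h
      exact ⟨m, by rw [← h, hm]⟩

lemma powUp_of_pow (i : Int) (hi : 2 ≤ i) : ∀ (fuel m k : Nat), m ≤ k → k - m ≤ fuel →
    powUpB i (i ^ m) (i ^ k) fuel = i ^ k := by
  intro fuel
  induction fuel with
  | zero =>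
    intro m k hmk hf
    have : m = k := by omega
    subst this; simp [powUpB]
  | succ f ih =>
    intro m k hmk hf
    by_cases hm : m = k
    · subst hm; simp [powUpB]
    · have hlt : i ^ m < i ^ k := pow_lt_pow_right₀ (by omega) (by omega)
      simp only [powUpB, hlt, if_pos]
      rw [← pow_succ]
      exact ih (m + 1) k (by omega) (by omega)

lemma divOut_pow (i : Int) (hi : 2 ≤ i) : ∀ (k fuel : Nat), (i ^ k).toNat ≤ fuel →
    divOutP i (i ^ k) fuel = 1 := by
  intro k
  induction k with
  | zero =>
    intro fuel hf
    simp only [pow_zero] at hf ⊢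
    obtain ⟨g, rfl⟩ : ∃ g, fuel = g + 1 := ⟨fuel - 1, by omega⟩
    have hm : PySem.Int.mod 1 i = 1 := by
      rw [PySem.Int.mod_eq_emod_of_pos (by omega)]
      exact Int.emod_eq_of_lt (by omega) (by omega)
    simp [divOutP, hm]
  | succ k ih =>
    intro fuel hf
    have hpos : (0:Int) < i ^ k := pow_pos (by omega) k
    have hstep : i ^ k + 1 ≤ i ^ (k+1) := by rw [pow_succ]; nlinarith
    obtain ⟨g, rfl⟩ : ∃ g, fuel = g + 1 := ⟨fuel - 1, by omega⟩
    have hm : PySem.Int.mod (i ^ (k+1)) i = 0 :=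
      (PySem.Int.mod_eq_zero_iff_dvd _ i).2 (dvd_pow_self i (Nat.succ_ne_zero k))
    have hfd : PySem.Int.floordiv (i ^ (k+1)) i = i ^ k := by
      rw [PySem.Int.floordiv_eq_ediv_of_pos (by omega), pow_succ]
      exact Int.mul_ediv_cancel _ (by omega)
    simp only [divOutP, hm, if_pos, hfd]
    exact ih g (by omega)

lemma divOut_eq_one_pow (i : Int) (hi : 2 ≤ i) : ∀ (fuel : Nat) (v : Int), 1 ≤ v →
    v.toNat ≤ fuel → divOutP i v fuel = 1 → ∃ k, v = i ^ k := by
  intro fuel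
  induction fuel with
  | zero => intro v h1 h2; omega
  | succ f ih =>
    intro v h1 h2 hdo
    by_cases h : PySem.Int.mod v i = 0
    · have hdvd : i ∣ v := (PySem.Int.mod_eq_zero_iff_dvd v i).1 h
      have hle : i ≤ v := Int.le_of_dvd (by omega) hdvd
      have hfd : PySem.Int.floordiv v i = v / i := PySem.Int.floordiv_eq_ediv_of_pos (by omega)
      have h1' : 1 ≤ v / i := by rw [Int.le_ediv_iff_mul_le (by omega)]; omega
      have hlt : v / i < v := by rw [Int.ediv_lt_iff_lt_mul (by omega)]; nlinarith
      simp only [divOutP, h, if_pos] at hdo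
      obtain ⟨k, hk⟩ := ih (PySem.Int.floordiv v i) (by omega) (by omega) hdo
      refine ⟨k + 1, ?_⟩
      rw [pow_succ, ← hk, hfd]
      exact (Int.ediv_mul_cancel hdvd).symm
    · simp only [divOutP, h, if_neg, not_false_iff] at hdo
      exact ⟨0, by rw [pow_zero]; omega⟩

lemma powIff (i N : Int) (hi : 2 ≤ i) (hge : i * i ≤ N) (h : PySem.Int.mod N i = 0) :
    divOutP i N N.toNat = 1 ↔ powUpB i i N N.toNat = N := by
  have hN4 : 4 ≤ N := by nlinarith
  constructor
  · intro h1
    obtain ⟨k, hk⟩ := divOut_eq_one_pow i hi N.toNat N (by omega) le_rfl h1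
    have hk1 : 1 ≤ k := by
      rcases Nat.eq_zero_or_pos k with h0 | h0
      · subst h0; simp at hk; omega
      · omega
    have h2k : (2:Int) ^ k ≤ i ^ k := pow_le_pow_left₀ (by omega) (by omega) k
    have hklt : (k:Int) < 2 ^ k := by exact_mod_cast Nat.lt_two_pow_self
    have hkN : k - 1 ≤ N.toNat := by
      have : (k:Int) < N := by rw [hk]; omega
      omega
    have := powUp_of_pow i hi N.toNat 1 k hk1 (by omega)
    rw [pow_one, ← hk] at this
    exact this
  · intro h2
    obtain ⟨k, hk⟩ := powUp_imp_pow i N.toNat i N 1 (pow_one i).symm h2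
    subst hk
    exact divOut_pow i hi k _ le_rfl

-- the two trial-division loops agree step by step; fuel of A = remaining range elements
lemma scanAB (N : Int) (hN : 2 ≤ N) : ∀ (fuel : Nat) (i : Int) (fB : Nat), 2 ≤ i →
    fuel = (N + 1 - i).toNat → fuel ≤ fB →
    finishA (outerA i N PySem.Dict.empty fuel) = prLoopB i N fB := by
  intro fuel
  induction fuel with
  | zero =>
    intro i fB hi hf hfB
    have hiN : N + 1 ≤ i := by omega
    have hlt : N < i * i := by nlinarith
    have hL : finishA (outerA i N PySem.Dict.empty 0) = N := by
      have hN1 : N ≠ 1 := by omega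
      simp [outerA, finishA, hN1, sing_size, sing_keys]
    rw [hL]
    cases fB with
    | zero => simp [prLoopB]; omega
    | succ g => simp [prLoopB, hlt]; omega
  | succ f ih =>
    intro i fB hi hf hfB
    have hiN : i ≤ N := by omega
    obtain ⟨g, rfl⟩ : ∃ g, fB = g + 1 := ⟨fB - 1, by omega⟩
    by_cases hb : N < i * i
    · have hN1 : N ≠ 1 := by omega
      simp [outerA, finishA, prLoopB, hb, hN1, sing_size, sing_keys]
    · have hN4 : 4 ≤ N := by nlinarith
      have hfuel : (0:Nat) < N.toNat := by omega
      by_cases h : PySem.Int.mod N i = 0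
      · -- a factor is found: A divides it out and keeps looping, B decides now by growing powers
        have hr := divOutP_spec i hi N.toNat N (by omega) (le_refl _)
        set r := divOutP i N N.toNat with hrdef
        have hstep : outerA i N PySem.Dict.empty (f+1)
            = outerA (i+1) r (PySem.Dict.empty.insert i 1) f := by
          simp [outerA, hb, innerA_eq, hfuel, h]
          rw [← hrdef]
        have hRHS : prLoopB i N (g+1) = (if r = 1 then i else -1) := by
          have hiff := powIff i N hi (by omega) h
          simp only [prLoopB, hb, h, if_pos, if_false]
          rw [← hrdef] at hiff
          by_cases hr1 : r = 1
          · simp [hr1, hiff.1 hr1]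
          · have : ¬ powUpB i i N N.toNat = N := fun hc => hr1 (hiff.2 hc)
            simp [hr1, this]
        rw [hstep, hRHS]
        by_cases hr1 : r = 1
        · rw [hr1, outerA_one (i+1) (by omega)]
          simp [finishA, sing_size, sing_keys]
        · simp only [hr1, if_false]
          obtain ⟨h1, h2, h3⟩ := outerA_grow f (i+1) r (PySem.Dict.empty.insert i 1) (by omega) hr.1
          set q := outerA (i+1) r (PySem.Dict.empty.insert i 1) f with hq
          rcases h3 with ⟨ha, hbq⟩ | ⟨t, ht, hti⟩
          · -- no further factor: the remainder r ≠ 1, r ≠ i is inserted, two keys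
            have hri : r ≠ i := by
              intro hcontra; exact hr.2.1 (by rw [hcontra]; exact mod_self_zero i)
            have : q = (r, PySem.Dict.empty.insert i 1) := Prod.ext ha hbq
            rw [this]
            simp [finishA, hr1, sing2_size i r hri]
          · -- a second key t ≥ i+1 was inserted: never one single key
            have hik : i ∈ q.2.keys := h2 i (by rw [sing_keys]; simp)
            have hti' : t ≠ i := by omega
            unfold finishA
            by_cases hq1 : q.1 ≠ 1
            · have hiK : i ∈ (q.2.insert q.1 1).keys := (PySem.Dict.mem_keys_insert _ _ _ _).2 (Or.inr hik)
              have htK : t ∈ (q.2.insert q.1 1).keys := (PySem.Dict.mem_keys_insert _ _ _ _).2 (Or.inr ht)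
              have h2le : 2 ≤ (q.2.insert q.1 1).keys.length := two_mem_length htK hiK hti'
              have : (q.2.insert q.1 1).size ≠ 1 := by rw [size_eq_keys_length]; omega
              simp [hq1, this]
            · have h2le : 2 ≤ q.2.keys.length := two_mem_length ht hik hti'
              have : q.2.size ≠ 1 := by rw [size_eq_keys_length]; omega
              simp [hq1, this]
      · -- i divides nothing: both loops move on to i+1
        have hMM : divOutP i N N.toNat = N := by
          cases hN0 : N.toNat with
          | zero => omega
          | succ k => simp [divOutP, h]
        have hstep : outerA i N PySem.Dict.empty (f+1)
            = outerA (i+1) N PySem.Dict.empty f := by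
          simp [outerA, hb, innerA_eq, h, hMM]
        have hRHS : prLoopB i N (g+1) = prLoopB (i+1) N g := by
          simp [prLoopB, hb, h]
        rw [hstep, hRHS]
        exact ih (i+1) g (by omega) (by omega) (by omega)

lemma helperEq (v : Int) : singlePrimeFactorA v = primeRootB v := by
  by_cases hv : 2 ≤ v
  · have : (v - 1).toNat = (v + 1 - 2).toNat := by omega
    rw [singlePrimeFactorA, this]
    exact scanAB v hv _ 2 (v.toNat + 1) (le_refl 2) rfl (by omega)
  · by_cases h1 : v = 1
    · subst h1; decide
    · have h0 : (v - 1).toNat = 0 := by omega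
      have ht : v.toNat = 0 := by omega
      have hlt : v < 2 * 2 := by omega
      simp [singlePrimeFactorA, primeRootB, h0, ht, outerA, prLoopB, finishA, h1,
        sing_size, sing_keys]
      intro h4 _
      omega

-- ----- the online pass vs group-then-closed-form -----

-- C(x,2) as A computes it
def pairT (x : Int) : Int := PySem.Int.floordiv (x * (x - 1)) 2

lemma pairT_succ (x : Int) : pairT (x + 1) = pairT x + x := by
  unfold pairT
  rw [PySem.Int.floordiv_eq_ediv_of_pos (by omega), PySem.Int.floordiv_eq_ediv_of_pos (by omega)]
  have h : (x + 1) * (x + 1 - 1) = x * (x - 1) + x * 2 := by ring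
  rw [h, Int.add_mul_ediv_right _ _ (by omega)]

-- sum of g over the values of a dict, through its items
def vsum (g : Int → Int) (d : PySem.Dict Int Int) : Int :=
  (d.items.map (fun q => g q.2)).sum

lemma items_replace_sum (g : Int → Int) : ∀ (l : List (Int × Int)) (p w x : Int),
    (l.map Prod.fst).Nodup → (p, x) ∈ l →
    ((l.map (fun q => if q.1 == p then (p, w) else q)).map (fun q => g q.2)).sum
      = (l.map (fun q => g q.2)).sum + g w - g x := by
  intro l
  induction l with
  | nil => intro p w x _ hm; simp at hm
  | cons q t ih =>
    intro p w x hnd hm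
    simp only [List.map_cons, List.nodup_cons] at hnd
    rcases List.mem_cons.1 hm with heq | hmem
    · have hq : q = (p, x) := heq.symm
      subst hq
      have hid : t.map (fun q => if q.1 == p then (p, w) else q) = t := by
        conv_rhs => rw [← List.map_id t]
        apply List.map_congr_left
        intro a ha
        have hmemf : a.1 ∈ t.map Prod.fst := List.mem_map_of_mem (f := Prod.fst) ha
        have hne : a.1 ≠ p := fun hc => hnd.1 (hc ▸ hmemf)
        simp [hne]
      simp only [List.map_cons, beq_self_eq_true, if_true, List.sum_cons, hid]
      ring
    · have hp : p ∈ t.map Prod.fst := List.mem_map_of_mem (f := Prod.fst) hmem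
      have hqp : q.1 ≠ p := fun hc => hnd.1 (hc ▸ hp)
      have hf : (q.1 == p) = false := beq_eq_false_iff_ne.2 hqp
      simp only [List.map_cons, List.sum_cons, hf, Bool.false_eq_true, if_false]
      rw [ih p w x hnd.2 hmem]; ring

lemma vsum_insert (g : Int → Int) (d : PySem.Dict Int Int) (p : Int) (hnd : d.keys.Nodup) :
    vsum g (d.insert p (d.getD p 0 + 1))
      = vsum g d + g (d.getD p 0 + 1) - g (d.getD p 0) + (if d.contains p then 0 else g 0) := by
  by_cases hc : d.contains p
  · have hc' : (d.get? p).isSome := by rw [← PySem.Dict.contains_eq_isSome_get?]; exact hc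
    obtain ⟨x0, hg⟩ := Option.isSome_iff_exists.1 hc'
    have hx0 : d.getD p 0 = x0 := PySem.Dict.getD_of_get?_eq_some d 0 hg
    have hmem : (p, d.getD p 0) ∈ d.items := by
      rw [hx0]; exact PySem.Dict.mem_items_of_get?_eq_some d hg
    unfold vsum
    rw [PySem.Dict.items_insert_of_contains d _ hc]
    rw [items_replace_sum g d.items p (d.getD p 0 + 1) (d.getD p 0) hnd hmem]
    simp [hc]
  · have hcf : d.contains p = false := by simpa using hc
    have hx : d.getD p 0 = 0 := PySem.Dict.getD_of_not_contains d 0 hcf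
    unfold vsum
    rw [PySem.Dict.items_insert_of_not_contains d _ hcf]
    simp [hx, hcf]

-- the invariant of B's online pass against A's grouping fold
lemma mainInv : ∀ (l : List Int) (c res pp : Int) (d : PySem.Dict Int Int),
    d.keys.Nodup → pp = vsum id d → res = c * pp + vsum pairT d →
    l.foldl stepB (res, c, pp, d)
      = ((l.foldl stepA (c, d)).1 * vsum id (l.foldl stepA (c, d)).2
           + vsum pairT (l.foldl stepA (c, d)).2,
         (l.foldl stepA (c, d)).1, vsum id (l.foldl stepA (c, d)).2, (l.foldl stepA (c, d)).2)
      ∧ (l.foldl stepA (c, d)).2.keys.Nodup := by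
  intro l
  induction l with
  | nil =>
    intro c res pp d hnd hpp hres
    subst hpp; subst hres
    simp
    exact hnd
  | cons v t ih =>
    intro c res pp d hnd hpp hres
    simp only [List.foldl_cons]
    by_cases hv : v = 1
    · subst hv
      have hA : stepA (c, d) 1 = (c + 1, d) := by simp [stepA]
      have hB : stepB (res, c, pp, d) 1 = (res + pp, c + 1, pp, d) := by simp [stepB]
      rw [hA, hB]
      exact ih (c + 1) (res + pp) pp d hnd hpp (by rw [hres, hpp]; ring_nf)
    · rw [show stepA (c, d) v = if singlePrimeFactorA v = -1 then (c, d)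
            else (c, d.insert (singlePrimeFactorA v) (d.getD (singlePrimeFactorA v) 0 + 1))
          from by simp [stepA, hv]]
      rw [show stepB (res, c, pp, d) v = if primeRootB v = -1 then (res, c, pp, d)
            else (res + c + d.getD (primeRootB v) 0, c, pp + 1,
                  d.insert (primeRootB v) (d.getD (primeRootB v) 0 + 1))
          from by simp [stepB, hv]]
      rw [← helperEq v]
      by_cases hp : singlePrimeFactorA v = -1
      · simp only [hp, if_pos]
        exact ih c res pp d hnd hpp hres
      · simp only [hp, if_neg, not_false_iff]
        set p := singlePrimeFactorA v
        set x := d.getD p 0 with hx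
        have hid := vsum_insert id d p hnd
        have hpt := vsum_insert pairT d p hnd
        have hpt1 : pairT 0 = 0 := rfl
        have hpts : pairT (x + 1) = pairT x + x := pairT_succ x
        have hvid : vsum id (d.insert p (x + 1)) = pp + 1 := by
          rw [hid, ← hpp]; split_ifs <;> simp [← hx] <;> omega
        have hvpt : vsum pairT (d.insert p (x + 1)) = vsum pairT d + x := by
          rw [hpt, ← hx, hpts]
          split_ifs with h
          · ring
          · have hx0 : x = 0 := by
              rw [hx]; exact PySem.Dict.getD_of_not_contains d 0 (by simpa using h)
            rw [hx0]; simp [pairT]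
        exact ih c (res + c + x) (pp + 1) (d.insert p (x + 1))
          (PySem.Dict.nodup_keys_insert _ _ _ hnd) hvid.symm
          (by rw [hres, hvpt]; ring)

-- A's final fold over the keys is c * Σvalues + Σ pairT(values)
lemma finalSum (d : PySem.Dict Int Int) (hnd : d.keys.Nodup) (c : Int) :
    d.keys.foldl (fun r k =>
        r + (c * d.getD k 0 + PySem.Int.floordiv (d.getD k 0 * (d.getD k 0 - 1)) 2)) 0
      = c * vsum id d + vsum pairT d := by
  rw [PySem.List.foldl_add]
  have hkeys : d.keys.map (fun k => c * d.getD k 0 + pairT (d.getD k 0))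
      = (d.keys.map (fun k => d.getD k 0)).map (fun x => c * x + pairT x) := by
    rw [List.map_map]; rfl
  have hvals : d.keys.map (fun k => d.getD k 0) = d.values :=
    (PySem.Dict.values_eq_map_keys d hnd 0).symm
  have : d.keys.map (fun k => c * d.getD k 0
        + PySem.Int.floordiv (d.getD k 0 * (d.getD k 0 - 1)) 2)
      = d.values.map (fun x => c * x + pairT x) := by
    rw [← hvals, ← hkeys]; rfl
  rw [this, PySem.List.sum_map_add_int]
  have hv : d.values = d.items.map (fun q => q.2) := rfl
  have h1 : (d.values.map (fun x => c * x)).sum = c * vsum id d := by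
    rw [hv, List.map_map]
    unfold vsum
    simp only [Function.comp_def, id]
    exact List.sum_map_mul_left d.items (fun q : Int × Int => q.2) c
  have h2 : (d.values.map pairT).sum = vsum pairT d := by
    rw [hv, List.map_map]; rfl
  rw [h1, h2]
  ring

-- ===== VERDICT (by name: the statement is the Claim_ definition above) =====
theorem cntsingleFactorPair_spec : Claim_equal_cntsingleFactorPair := by
  intro arr N _ _
  unfold Spec_cntsingleFactorPair cntsingleFactorPair cntsingleFactorPair_alt
  have hA : List.foldl (fun st i => stepA st (PySem.List.pyGetD arr i 0))
        ((0 : Int), (PySem.Dict.empty : PySem.Dict Int Int)) (PySem.List.pyRange 0 N 1)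
      = List.foldl stepA ((0 : Int), (PySem.Dict.empty : PySem.Dict Int Int))
          ((PySem.List.pyRange 0 N 1).map (fun i => PySem.List.pyGetD arr i 0)) := by
    rw [List.foldl_map]
  have hB : List.foldl (fun st i => stepB st (PySem.List.pyGetD arr i 0))
        ((0 : Int), (0 : Int), (0 : Int), (PySem.Dict.empty : PySem.Dict Int Int))
        (PySem.List.pyRange 0 N 1)
      = List.foldl stepB ((0 : Int), (0 : Int), (0 : Int),
          (PySem.Dict.empty : PySem.Dict Int Int))
          ((PySem.List.pyRange 0 N 1).map (fun i => PySem.List.pyGetD arr i 0)) := by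
    rw [List.foldl_map]
  rw [hA, hB]
  obtain ⟨hst, hnd⟩ := mainInv ((PySem.List.pyRange 0 N 1).map (fun i => PySem.List.pyGetD arr i 0))
    0 0 0 PySem.Dict.empty (by simp) (by rfl) (by rfl)
  rw [hst]
  exact finalSum
    (((PySem.List.pyRange 0 N 1).map (fun i => PySem.List.pyGetD arr i 0)).foldl stepA
      ((0 : Int), PySem.Dict.empty)).2 hnd
    (((PySem.List.pyRange 0 N 1).map (fun i => PySem.List.pyGetD arr i 0)).foldl stepA
      ((0 : Int), PySem.Dict.empty)).1
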